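-- pv_equiv track=rewrite | github.com/dplocki/advent-of-code | 2023/2023_07.py | get_hand_combinations
-- ===== SOURCE A (Python) =====
-- from typing import Callable, Dict, Generator, Iterable, Tuple
--
-- def get_hand_combinations(possibilities: Iterable[str], hand: str, index: int, prefix: str) -> Generator[str, None, None]:
--     if index == 5:
--         yield prefix
--         return
--
--     if hand[index] == 'J':
--         for possibility in possibilities:
--             yield from get_hand_combinations(possibilities, hand, index + 1, prefix + possibility)
--     else:
--         yield from get_hand_combinations(possibilities, hand, index + 1, prefix + hand[index])
-- ===== SOURCE B (Python) =====
-- def get_hand_combinations(possibilities, hand, index, prefix):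
--     possibilities = list(possibilities)
--     cells = [hand[i] for i in range(index, 5)]
--     js = [k for k, c in enumerate(cells) if c == 'J']
--     combos = [[]]
--     for _ in js:
--         combos = [combo + [p] for combo in combos for p in possibilities]
--     for combo in combos:
--         chars = list(cells)
--         for k, p in zip(js, combo):
--             chars[k] = p
--         yield prefix + ''.join(chars)
-- ===== Notes on version B (the rewrite author's own statement) =====
-- stated objective: alternative
-- what changed: Replaces A's per-position recursion (branching at every character) by a flat pass: read the suffix cells once, build the Cartesian product of the J substitutions with an iterative list product, and emit each filled suffix in one loop.
-- outside the precondition, e.g. on get_hand_combinations([], 'J2JA', -3, 'x'): A returns [], B raises IndexError; on get_hand_combinations([], 'AAAJJ2J', 6, ''): A returns [], B returns ['']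
import Mathlib
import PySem

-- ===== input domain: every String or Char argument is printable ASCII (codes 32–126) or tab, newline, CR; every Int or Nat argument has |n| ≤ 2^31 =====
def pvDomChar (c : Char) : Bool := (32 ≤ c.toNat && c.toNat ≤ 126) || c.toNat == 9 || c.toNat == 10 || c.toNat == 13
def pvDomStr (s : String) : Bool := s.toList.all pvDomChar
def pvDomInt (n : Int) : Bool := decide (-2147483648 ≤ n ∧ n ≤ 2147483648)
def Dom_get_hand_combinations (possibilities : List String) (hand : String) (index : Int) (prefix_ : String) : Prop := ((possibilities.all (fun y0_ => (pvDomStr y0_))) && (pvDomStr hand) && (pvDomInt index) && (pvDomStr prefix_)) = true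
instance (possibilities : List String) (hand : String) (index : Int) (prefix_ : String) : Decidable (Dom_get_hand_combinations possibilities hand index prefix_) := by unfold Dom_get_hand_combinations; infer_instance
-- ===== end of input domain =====

-- B replaces A's per-position recursion by one flat pass: collect the suffix cells once,
-- build the Cartesian product of the J substitutions iteratively, and emit each filled suffix
-- (objective: alternative decomposition, same cost).

-- ===== PORT A =====
-- A recurses from `index` up to 5; fuel (5 - index).toNat counts the remaining recursion depth.
def goA (poss : List String) (hand : String) (fuel : Nat) (index : Int) (prefix_ : String) : List String :=
  if index = 5 then [prefix_]
  else
    match fuel with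
    | 0 => []
    | fuel' + 1 =>
      match PySem.Str.pyGet? hand index with
      | none => []   -- hand[index] raises IndexError (outside Pre_)
      | some c =>
        if c = 'J' then
          poss.flatMap (fun p => goA poss hand fuel' (index + 1) (prefix_ ++ p))
        else
          goA poss hand fuel' (index + 1) (prefix_ ++ c.toString)

def get_hand_combinations (possibilities : List String) (hand : String) (index : Int) (prefix_ : String) : List String :=
  goA possibilities hand (5 - index).toNat index prefix_

-- ===== PORT B =====
-- combos = [combo + [p] for combo in combos for p in possibilities]
def extendCombos (poss : List String) (combos : List (List String)) : List (List String) :=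
  combos.flatMap (fun combo => poss.map (fun p => combo ++ [p]))

-- the n-fold Cartesian product built left to right, as Source B's loop does
def combosB (poss : List String) : Nat → List (List String)
  | 0 => [[]]
  | n + 1 => extendCombos poss (combosB poss n)

-- rebuild the suffix: a 'J' cell consumes the next combo element, any other cell stays
def fillB : List Char → List String → String
  | [], _ => ""
  | c :: rest, combo =>
    if c = 'J' then
      match combo with
      | p :: t => p ++ fillB rest t
      | [] => fillB rest []
    else c.toString ++ fillB rest combo

def get_hand_combinations_alt (possibilities : List String) (hand : String) (index : Int) (prefix_ : String) : List String :=
  let cells := (PySem.List.pyRange index 5 1).filterMap (fun i => PySem.Str.pyGet? hand i)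
  let nJ := (cells.filter (fun c => c = 'J')).length
  (combosB possibilities nJ).map (fun combo => prefix_ ++ fillB cells combo)

-- ===== PRECONDITION & SPEC =====
-- Pre_ requires every position in [index,5) to be a valid Python index of hand (so index = 5,
-- or index < 5 with -len(hand) ≤ index and len(hand) ≥ 5). Outside it A normally raises
-- IndexError, but when possibilities is empty and an in-range 'J' precedes the first bad
-- position A accidentally short-circuits to an empty result; B, which reads all positions up
-- front (and treats index > 5 as an empty suffix), raises IndexError there or yields the prefix.
def Pre_get_hand_combinations (possibilities : List String) (hand : String) (index : Int) (prefix_ : String) : Prop :=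
  index = 5 ∨ (index < 5 ∧ 5 ≤ PySem.Str.len hand ∧ -(PySem.Str.len hand) ≤ index)
instance (possibilities : List String) (hand : String) (index : Int) (prefix_ : String) : Decidable (Pre_get_hand_combinations possibilities hand index prefix_) := by unfold Pre_get_hand_combinations; infer_instance

def pvWitness_get_hand_combinations : List String × String × Int × String := (["A", "T"], "TJ2J9", 0, "")

def Spec_get_hand_combinations (possibilities : List String) (hand : String) (index : Int) (prefix_ : String) (out : List String) : Prop := out = get_hand_combinations_alt possibilities hand index prefix_
instance (possibilities : List String) (hand : String) (index : Int) (prefix_ : String) (out : List String) : Decidable (Spec_get_hand_combinations possibilities hand index prefix_ out) := by unfold Spec_get_hand_combinations; infer_instance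

-- ===== CLAIM (what is proved, stated in full; the proofs are below) =====
def Claim_equal_get_hand_combinations : Prop := ∀ (possibilities : List String) (hand : String) (index : Int) (prefix_ : String), Dom_get_hand_combinations possibilities hand index prefix_ → Pre_get_hand_combinations possibilities hand index prefix_ → Spec_get_hand_combinations possibilities hand index prefix_ (get_hand_combinations possibilities hand index prefix_)

-- ===== LEMMAS AND PROOFS =====

-- the right-extension product equals left-cons nesting (first J varies slowest, as A's outer loop does)
theorem combosB_succ_left (poss : List String) (n : Nat) :
    combosB poss (n + 1) = poss.flatMap (fun p => (combosB poss n).map (p :: ·)) := by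
  induction n with
  | zero =>
    simp only [combosB, extendCombos]
    induction poss <;> simp_all
  | succ n ih =>
    have h1 : combosB poss (n + 1 + 1) = extendCombos poss (combosB poss (n + 1)) := rfl
    rw [h1]
    conv_lhs => rw [ih]
    conv_rhs => rw [show combosB poss (n + 1) = extendCombos poss (combosB poss n) from rfl]
    simp only [extendCombos, List.flatMap_assoc, List.flatMap_map, List.map_flatMap,
      List.map_map, Function.comp_def, List.cons_append]

theorem goA_eq_alt (poss : List String) (hand : String) :
    ∀ (fuel : Nat) (index : Int) (prefix_ : String),
      index ≤ 5 → (5 - index).toNat = fuel →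
      (∀ i : Int, index ≤ i → i < 5 → (PySem.Str.pyGet? hand i).isSome) →
      goA poss hand fuel index prefix_ =
        (combosB poss ((((PySem.List.pyRange index 5 1).filterMap (fun i => PySem.Str.pyGet? hand i)).filter (fun c => c = 'J')).length)).map
          (fun combo => prefix_ ++ fillB ((PySem.List.pyRange index 5 1).filterMap (fun i => PySem.Str.pyGet? hand i)) combo) := by
  intro fuel
  induction fuel with
  | zero =>
    intro index prefix_ hle hfuel _
    have h5 : index = 5 := by omega
    subst h5
    have hr : PySem.List.pyRange (5:Int) 5 1 = [] := by decide
    simp [goA, combosB, fillB, hr]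
  | succ fuel ih =>
    intro index prefix_ hle hfuel hsome
    have hlt : index < 5 := by omega
    have hrange : PySem.List.pyRange index 5 1 = index :: PySem.List.pyRange (index + 1) 5 1 :=
      PySem.List.pyRange_one_cons hlt
    obtain ⟨c, hc⟩ := Option.isSome_iff_exists.mp (hsome index le_rfl hlt)
    have ih' := fun p => ih (index + 1) p (by omega) (by omega)
      (fun i h1 h2 => hsome i (by omega) h2)
    rw [hrange]
    by_cases hJ : c = 'J'
    · subst hJ
      have hstep : goA poss hand (fuel + 1) index prefix_ =
          poss.flatMap (fun p => goA poss hand fuel (index + 1) (prefix_ ++ p)) := by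
        rw [goA.eq_def]
        rw [if_neg (show ¬ index = 5 by omega), hc]
        simp
      rw [hstep]
      simp only [List.filterMap_cons, hc]
      rw [List.filter_cons_of_pos (by simp)]
      simp only [List.length_cons]
      rw [combosB_succ_left, List.map_flatMap]
      refine congrArg (fun f => List.flatMap f poss) (funext fun p => ?_)
      rw [ih' (prefix_ ++ p)]
      simp only [List.map_map]
      refine congrArg (fun f => List.map f _) (funext fun t => ?_)
      simp [fillB, String.append_assoc]
    · have hstep : goA poss hand (fuel + 1) index prefix_ =
          goA poss hand fuel (index + 1) (prefix_ ++ c.toString) := by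
        rw [goA.eq_def]
        rw [if_neg (show ¬ index = 5 by omega), hc]
        simp [hJ]
      rw [hstep, ih' (prefix_ ++ c.toString)]
      simp only [List.filterMap_cons, hc]
      rw [List.filter_cons_of_neg (by simp [hJ])]
      refine List.map_congr_left ?_
      intro t _
      simp only [fillB, if_neg hJ]
      rw [String.append_assoc]

-- ===== VERDICT (by name: the statement is the Claim_ definition above) =====
theorem get_hand_combinations_spec : Claim_equal_get_hand_combinations := by
  intro poss hand index prefix_ _hdom hpre
  show _ = _
  have hle : index ≤ 5 := by
    rcases hpre with h | h
    · omega
    · omega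
  have hsome : ∀ i : Int, index ≤ i → i < 5 → (PySem.Str.pyGet? hand i).isSome := by
    intro i h1 h2
    rcases hpre with h | h
    · omega
    · obtain ⟨_, hlen, hneg⟩ := h
      rw [Option.isSome_iff_ne_none]
      intro hnone
      simp only [PySem.Str.pyGet?_eq, PySem.Chars.pyGet?_eq_listPyGet?,
        PySem.List.pyGet?_eq_none_iff] at hnone
      apply hnone
      have hl : PySem.Str.len hand = (hand.toList.length : Int) := by simp
      rw [hl] at hlen hneg
      simp only [PySem.Raise.InRange]
      omega
  have := goA_eq_alt poss hand (5 - index).toNat index prefix_ hle rfl hsome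
  simp only [get_hand_combinations, get_hand_combinations_alt]
  exact this
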